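-- pv_equiv track=rewrite | github.com/folenta/Diplomovka | segmentation.py | findMissingFingerTips
-- ===== SOURCE A (Python) =====
-- def findMissingFingerTips(fingerTips, palmprintBorder, middlePalmprintRow):
--     # Funkcia najde chybajuce konceky prstov
--
--     increasing = False
--     increasingLength = 0
--     newFingerTips = []
--
--     # Postupne je prehladavany obrys odtlacku, pricom sa zaznamenava ci obrys odtlacku stupa alebo klesa.
--     # Ked obrys odtlacku stupa aspon 5 po sebe iducich blokov a nasledne zacne klesat, je dany bod uchovany
--     # ako potencialny koncek prsta a je porovnany s uz najdenymi koncekmi prstov.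
--     for i in range(len(palmprintBorder) - 1):
--         # Zaujima nas iba vrchna polovica odtlacku
--         if palmprintBorder[i][0] > middlePalmprintRow:
--             continue
--         if palmprintBorder[i + 1][0] < palmprintBorder[i][0]:
--             increasing = True
--             increasingLength += 1
--         if palmprintBorder[i + 1][0] > palmprintBorder[i][0] and increasing:
--             increasing = False
--             if increasingLength <= 5:
--                 increasingLength = 0
--                 continue
--             increasingLength = 0
--             currentRow, currentCol = palmprintBorder[i]
--             found = False
--             for tip in fingerTips:
--                 dist = abs(currentCol - tip[1])
--                 if dist <= 5:
--                     found = True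
--             if not found:
--                 fingerTips.append((currentRow, currentCol))
--                 newFingerTips.append((currentRow, currentCol))
--
--     return fingerTips, newFingerTips
-- ===== SOURCE B (Python) =====
-- def findMissingFingerTips(fingerTips, palmprintBorder, middlePalmprintRow):
--     # Phase 1: scan the border once and collect every qualifying peak in order.
--     candidates = []
--     increasing = False
--     run = 0
--     for cur, nxt in zip(palmprintBorder, palmprintBorder[1:]):
--         if cur[0] > middlePalmprintRow:
--             continue
--         if nxt[0] < cur[0]:
--             increasing = True
--             run += 1
--         if nxt[0] > cur[0] and increasing:
--             if run > 5:
--                 candidates.append((cur[0], cur[1]))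
--             increasing = False
--             run = 0
--     # Phase 2: greedily accept candidates that are not within 5 columns of a known tip.
--     newFingerTips = []
--     for row, col in candidates:
--         if not any(abs(col - t[1]) <= 5 for t in fingerTips):
--             fingerTips.append((row, col))
--             newFingerTips.append((row, col))
--     return fingerTips, newFingerTips
-- ===== Notes on version B (the rewrite author's own statement) =====
-- stated objective: simpler
-- what changed: Split A's single loop with interleaved dedup into two phases: a pure peak-detection scan producing a candidate list, then a separate greedy filter against the growing fingerTips list.
import Mathlib
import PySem

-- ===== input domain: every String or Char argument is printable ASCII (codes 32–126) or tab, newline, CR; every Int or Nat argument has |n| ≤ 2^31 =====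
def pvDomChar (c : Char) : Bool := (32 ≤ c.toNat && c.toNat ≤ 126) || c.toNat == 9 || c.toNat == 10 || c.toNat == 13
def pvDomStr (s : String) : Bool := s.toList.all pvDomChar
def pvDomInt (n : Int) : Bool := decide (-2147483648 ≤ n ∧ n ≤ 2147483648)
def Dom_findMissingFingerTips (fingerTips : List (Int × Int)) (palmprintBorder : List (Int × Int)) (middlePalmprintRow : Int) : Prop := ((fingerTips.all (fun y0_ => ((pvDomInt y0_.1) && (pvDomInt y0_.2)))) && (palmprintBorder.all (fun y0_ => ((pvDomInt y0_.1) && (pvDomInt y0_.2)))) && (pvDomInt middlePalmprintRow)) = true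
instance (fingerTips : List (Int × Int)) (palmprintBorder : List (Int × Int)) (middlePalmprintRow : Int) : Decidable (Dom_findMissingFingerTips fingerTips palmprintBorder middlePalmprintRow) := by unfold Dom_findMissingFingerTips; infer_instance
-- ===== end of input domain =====

-- B splits A's single loop (peak detection with inline dedup) into a pure peak-collection
-- scan followed by a separate greedy dedup pass; objective: simpler. A mutates fingerTips in
-- place (appends); B performs the same mutation, and the theorem is about the return value.

-- ===== PORT A =====
-- the for-loop over i in range(len-1): structural recursion over adjacent pairs, same state
def findMissingFingerTips_loop (mid : Int) : List (Int × Int) → Bool → Int → List (Int × Int) → List (Int × Int) → (List (Int × Int)) × (List (Int × Int))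
  | p :: q :: rest, increasing, incLen, tips, newTips =>
    if p.1 > mid then
      findMissingFingerTips_loop mid (q :: rest) increasing incLen tips newTips
    else
      let increasing' := if q.1 < p.1 then true else increasing
      let incLen' := if q.1 < p.1 then incLen + 1 else incLen
      if q.1 > p.1 ∧ increasing' = true then
        if incLen' ≤ 5 then
          findMissingFingerTips_loop mid (q :: rest) false 0 tips newTips
        else
          let found := tips.any (fun t => (p.2 - t.2).natAbs ≤ 5)
          if found then
            findMissingFingerTips_loop mid (q :: rest) false 0 tips newTips
          else
            findMissingFingerTips_loop mid (q :: rest) false 0 (tips ++ [p]) (newTips ++ [p])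
      else
        findMissingFingerTips_loop mid (q :: rest) increasing' incLen' tips newTips
  | _, _, _, tips, newTips => (tips, newTips)

def findMissingFingerTips (fingerTips : List (Int × Int)) (palmprintBorder : List (Int × Int)) (middlePalmprintRow : Int) : (List (Int × Int)) × (List (Int × Int)) :=
  findMissingFingerTips_loop middlePalmprintRow palmprintBorder false 0 fingerTips []

-- ===== PORT B =====
-- phase 1: collect qualifying peaks along the border, in scan order
def fmft_peaks (mid : Int) : List (Int × Int) → Bool → Int → List (Int × Int)
  | p :: q :: rest, increasing, run =>
    if p.1 > mid then fmft_peaks mid (q :: rest) increasing run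
    else
      let increasing' := if q.1 < p.1 then true else increasing
      let run' := if q.1 < p.1 then run + 1 else run
      if q.1 > p.1 ∧ increasing' = true then
        if 5 < run' then p :: fmft_peaks mid (q :: rest) false 0
        else fmft_peaks mid (q :: rest) false 0
      else fmft_peaks mid (q :: rest) increasing' run'
  | _, _, _ => []

-- phase 2: greedy filter of the candidates against the growing tip list
def fmft_dedup : List (Int × Int) → List (Int × Int) → List (Int × Int) → (List (Int × Int)) × (List (Int × Int))
  | tips, newTips, [] => (tips, newTips)
  | tips, newTips, c :: cs =>
    if tips.any (fun t => (c.2 - t.2).natAbs ≤ 5) then fmft_dedup tips newTips cs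
    else fmft_dedup (tips ++ [c]) (newTips ++ [c]) cs

def findMissingFingerTips_alt (fingerTips : List (Int × Int)) (palmprintBorder : List (Int × Int)) (middlePalmprintRow : Int) : (List (Int × Int)) × (List (Int × Int)) :=
  fmft_dedup fingerTips [] (fmft_peaks middlePalmprintRow palmprintBorder false 0)

-- ===== PRECONDITION & SPEC =====
def Spec_findMissingFingerTips (fingerTips : List (Int × Int)) (palmprintBorder : List (Int × Int)) (middlePalmprintRow : Int) (out : (List (Int × Int)) × (List (Int × Int))) : Prop := out = findMissingFingerTips_alt fingerTips palmprintBorder middlePalmprintRow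
instance (fingerTips : List (Int × Int)) (palmprintBorder : List (Int × Int)) (middlePalmprintRow : Int) (out : (List (Int × Int)) × (List (Int × Int))) : Decidable (Spec_findMissingFingerTips fingerTips palmprintBorder middlePalmprintRow out) := by unfold Spec_findMissingFingerTips; infer_instance

-- ===== CLAIM (what is proved, stated in full; the proofs are below) =====
def Claim_equal_findMissingFingerTips : Prop := ∀ (fingerTips : List (Int × Int)) (palmprintBorder : List (Int × Int)) (middlePalmprintRow : Int), Dom_findMissingFingerTips fingerTips palmprintBorder middlePalmprintRow → Spec_findMissingFingerTips fingerTips palmprintBorder middlePalmprintRow (findMissingFingerTips fingerTips palmprintBorder middlePalmprintRow)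

-- ===== LEMMAS AND PROOFS =====
-- Invariant: A's loop from any state equals phase-2 dedup of phase-1 peaks from that state.
theorem fmft_loop_eq (mid : Int) (border : List (Int × Int)) :
    ∀ (inc : Bool) (len : Int) (tips newTips : List (Int × Int)),
      findMissingFingerTips_loop mid border inc len tips newTips
        = fmft_dedup tips newTips (fmft_peaks mid border inc len) := by
  induction border with
  | nil => intro inc len tips newTips; simp [findMissingFingerTips_loop, fmft_peaks, fmft_dedup]
  | cons p rest ih =>
    cases rest with
    | nil => intro inc len tips newTips; simp [findMissingFingerTips_loop, fmft_peaks, fmft_dedup]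
    | cons q rest' =>
      intro inc len tips newTips
      simp only [findMissingFingerTips_loop, fmft_peaks]
      split_ifs <;> rw [ih] <;> (try simp only [fmft_dedup]) <;> (try split_ifs) <;>
        first | rfl | omega | simp_all

-- ===== VERDICT (by name: the statement is the Claim_ definition above) =====
theorem findMissingFingerTips_spec : Claim_equal_findMissingFingerTips := by
  intro ft pb mid _
  unfold Spec_findMissingFingerTips findMissingFingerTips findMissingFingerTips_alt
  exact fmft_loop_eq mid pb false 0 ft []
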